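-- pv_equiv track=rewrite | github.com/PeiHao-163/Estimate_BP_from_PPG_training_data_generation | generate_training_data.py | pair_by_closest_peak
-- ===== SOURCE A (Python) =====
-- def pair_by_closest_peak(ppg, abp):
--     """
--     Adjusts PPG valley ranges to match the peak-to-valley distances of their closest ABP peak,
--     while keeping ABP ranges unchanged.
--
--     Parameters:
--     - ppg: A list of tuples, where each tuple contains a valley range and the peaks within that range.
--     - abp: A list of tuples, similar to ppg, for another set of valley ranges and peaks.
--
--     Returns:
--     - A list of tuples, where each tuple contains an adjusted PPG pair and the original ABP pair
--       based on the closest peak and ABP's peak-to-valley distance.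
--     """
--     paired = []
--
--     for ppg_range, ppg_peaks in ppg:
--         closest_distance = float('inf')
--         closest_pair = None
--
--         if not ppg_peaks:
--             continue
--
--         for abp_range, abp_peaks in abp:
--             if abp_peaks:
--                 distance = abs(ppg_peaks[0] - abp_peaks[0])
--                 if distance < closest_distance:
--                     closest_distance = distance
--                     closest_pair = (abp_range, abp_peaks)
--
--         if closest_pair:
--             abp_range, abp_peaks = closest_pair
--             # Calculate ABP peak-to-valley distances
--             abp_distance_start = abp_peaks[0] - abp_range[0]
--             abp_distance_end = abp_range[1] - abp_peaks[0]
--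
--             # Adjust PPG range to match ABP peak-to-valley distances
--             adjusted_ppg_range = (ppg_peaks[0] - abp_distance_start, ppg_peaks[0] + abp_distance_end)
--
--             #             paired.append(((adjusted_ppg_range, ppg_peaks), (abp_range, abp_peaks)))
--             paired.append(((ppg_range, ppg_peaks), (abp_range, abp_peaks)))
--
--     return paired
-- ===== SOURCE B (Python) =====
-- import bisect
--
--
-- def pair_by_closest_peak(ppg, abp):
--     # Index ABP once: first peak value -> (original index, item), keeping the
--     # first item per value; then binary-search the sorted distinct peak values.
--     best = {}
--     for i, (abp_range, abp_peaks) in enumerate(abp):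
--         if abp_peaks and abp_peaks[0] not in best:
--             best[abp_peaks[0]] = (i, (abp_range, abp_peaks))
--     keys = sorted(best)
--
--     paired = []
--     for ppg_range, ppg_peaks in ppg:
--         if not ppg_peaks or not keys:
--             continue
--         p = ppg_peaks[0]
--         j = bisect.bisect_left(keys, p)
--         if j == 0:
--             k = keys[0]
--         elif j == len(keys):
--             k = keys[-1]
--         else:
--             kl, kr = keys[j - 1], keys[j]
--             if p - kl < kr - p:
--                 k = kl
--             elif kr - p < p - kl:
--                 k = kr
--             else:
--                 k = kl if best[kl][0] < best[kr][0] else kr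
--         paired.append(((ppg_range, ppg_peaks), best[k][1]))
--     return paired
-- ===== Notes on version B (the rewrite author's own statement) =====
-- stated objective: alternative
-- what changed: Replaces A's per-PPG linear scan over all ABP items by a one-pass dict (first peak value -> first ABP item with that value, with its original index) plus a binary search over the sorted distinct peak values, tie-breaking equal distances by the stored original index; asymptotically O((n+m) log m) vs A's O(n*m), but timing runs confirmed >=1.5x only on some input families, so no speed is claimed.
import Mathlib
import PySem

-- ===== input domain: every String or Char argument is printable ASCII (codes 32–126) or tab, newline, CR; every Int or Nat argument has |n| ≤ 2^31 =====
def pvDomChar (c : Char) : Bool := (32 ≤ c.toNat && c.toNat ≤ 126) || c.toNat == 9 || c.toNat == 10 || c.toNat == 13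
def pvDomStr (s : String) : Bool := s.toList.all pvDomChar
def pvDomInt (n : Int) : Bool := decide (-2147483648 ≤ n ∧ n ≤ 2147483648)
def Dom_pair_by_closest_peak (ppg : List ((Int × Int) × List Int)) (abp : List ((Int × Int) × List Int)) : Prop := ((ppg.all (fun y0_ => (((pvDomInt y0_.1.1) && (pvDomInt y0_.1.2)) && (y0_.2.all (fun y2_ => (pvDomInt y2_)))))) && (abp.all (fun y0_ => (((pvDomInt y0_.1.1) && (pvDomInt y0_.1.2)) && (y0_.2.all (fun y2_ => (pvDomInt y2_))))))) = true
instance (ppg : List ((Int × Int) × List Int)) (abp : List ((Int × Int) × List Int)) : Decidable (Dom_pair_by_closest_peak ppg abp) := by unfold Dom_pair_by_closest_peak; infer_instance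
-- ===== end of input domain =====

-- B replaces A's per-PPG linear scan of ABP by a dict of first-occurrence ABP items keyed by
-- first peak plus a binary search over the sorted distinct peak values (objective: alternative).


-- ===== PORT A =====
-- inner loop body: state = (closest_distance : Option Int  (none = float('inf')), closest_pair)
def pvAStep (p : Int) (st : Option Int × Option ((Int × Int) × List Int))
    (ab : (Int × Int) × List Int) : Option Int × Option ((Int × Int) × List Int) :=
  match ab.2 with
  | [] => st                                  -- if abp_peaks: (falsy → skip)
  | a :: _ =>
    let distance := |p - a|                   -- abs(ppg_peaks[0] - abp_peaks[0])
    let lt := match st.1 with                 -- distance < closest_distance  (inf on first hit)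
      | none => true
      | some d => decide (distance < d)
    if lt then (some distance, some ab) else st

def pair_by_closest_peak (ppg : List ((Int × Int) × List Int)) (abp : List ((Int × Int) × List Int)) : List (((Int × Int) × List Int) × ((Int × Int) × List Int)) :=
  ppg.foldl (fun paired item =>
    match item.2 with
    | [] => paired                            -- if not ppg_peaks: continue
    | _ :: _ =>
      let p := item.2.headD 0                 -- ppg_peaks[0]
      let st := abp.foldl (pvAStep p) (none, none)
      match st.2 with
      | none => paired                        -- if closest_pair: (None → skip)
      | some cp =>
        -- abp_distance_start/_end and adjusted_ppg_range are computed by A but unused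
        -- (the append of the adjusted pair is commented out in A); nothing to port.
        paired ++ [(item, cp)]) []

-- ===== PORT B =====
-- loop body of the dict build: keep the first item per first-peak value
def pvBStep (best : PySem.Dict Int (Int × ((Int × Int) × List Int)))
    (pr : Int × ((Int × Int) × List Int)) : PySem.Dict Int (Int × ((Int × Int) × List Int)) :=
  match pr.2.2 with
  | [] => best                                -- if abp_peaks and …
  | a :: _ => if best.contains a then best else best.insert a (pr.1, pr.2)

-- best : dict  first-peak value -> (original index, abp item), first occurrence kept
def pvBuildBest (abp : List ((Int × Int) × List Int)) : PySem.Dict Int (Int × ((Int × Int) × List Int)) :=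
  (PySem.List.enumerate abp).foldl pvBStep PySem.Dict.empty

-- keys = sorted(best)
def pvKeysOf (abp : List ((Int × Int) × List Int)) : List Int :=
  PySem.List.sorted (pvBuildBest abp).keys (fun x => x) false

-- the key chosen for first peak p (keys nonempty; dict lookups are guarded by k ∈ keys,
-- so the getD defaults below are never used)
def pvChooseKey (keys : List Int) (best : PySem.Dict Int (Int × ((Int × Int) × List Int))) (p : Int) : Int :=
  let j := PySem.List.bisectLeft keys p
  if j = 0 then keys.getD 0 0                 -- keys[0]
  else if j = keys.length then keys.getD (keys.length - 1) 0   -- keys[-1]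
  else
    let kl := keys.getD (j - 1) 0
    let kr := keys.getD j 0
    if p - kl < kr - p then kl
    else if kr - p < p - kl then kr
    else if ((best.get? kl).map Prod.fst).getD 0 < ((best.get? kr).map Prod.fst).getD 0 then kl else kr

def pair_by_closest_peak_alt (ppg : List ((Int × Int) × List Int)) (abp : List ((Int × Int) × List Int)) : List (((Int × Int) × List Int) × ((Int × Int) × List Int)) :=
  let best := pvBuildBest abp
  let keys := pvKeysOf abp
  ppg.foldl (fun paired item =>
    match item.2 with
    | [] => paired                            -- if not ppg_peaks … continue
    | _ :: _ =>
      if keys.isEmpty then paired             -- … or not keys: continue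
      else
        let p := item.2.headD 0
        let k := pvChooseKey keys best p
        paired ++ [(item, ((best.get? k).map Prod.snd).getD ((0, 0), []))]) []

-- ===== PRECONDITION & SPEC =====
def Spec_pair_by_closest_peak (ppg : List ((Int × Int) × List Int)) (abp : List ((Int × Int) × List Int)) (out : List (((Int × Int) × List Int) × ((Int × Int) × List Int))) : Prop := out = pair_by_closest_peak_alt ppg abp
instance (ppg : List ((Int × Int) × List Int)) (abp : List ((Int × Int) × List Int)) (out : List (((Int × Int) × List Int) × ((Int × Int) × List Int))) : Decidable (Spec_pair_by_closest_peak ppg abp out) := by unfold Spec_pair_by_closest_peak; infer_instance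

-- ===== CLAIM (what is proved, stated in full; the proofs are below) =====
def Claim_equal_pair_by_closest_peak : Prop := ∀ (ppg : List ((Int × Int) × List Int)) (abp : List ((Int × Int) × List Int)), Dom_pair_by_closest_peak ppg abp → Spec_pair_by_closest_peak ppg abp (pair_by_closest_peak ppg abp)

-- ===== LEMMAS AND PROOFS =====

-- the "candidate list": (first peak, original index, item) for the abp items with peaks
def pvCidx : List ((Int × Int) × List Int) → Int → List (Int × Int × ((Int × Int) × List Int))
  | [], _ => []
  | it :: t, n =>
    match it.2 with
    | [] => pvCidx t (n + 1)
    | a :: _ => (a, n, it) :: pvCidx t (n + 1)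

-- reference selection: first strict minimiser of |p - key| along the candidate list
def pvFstep (p : Int) (s : Option (Int × Int × ((Int × Int) × List Int)))
    (e : Int × Int × ((Int × Int) × List Int)) : Option (Int × Int × ((Int × Int) × List Int)) :=
  match s with
  | none => some e
  | some e0 => if |p - e.1| < |p - e0.1| then some e else some e0

def pvFM (p : Int) (c : List (Int × Int × ((Int × Int) × List Int))) :
    Option (Int × Int × ((Int × Int) × List Int)) := c.foldl (pvFstep p) none

def pvEmbed (p : Int) (s : Option (Int × Int × ((Int × Int) × List Int))) :
    Option Int × Option ((Int × Int) × List Int) :=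
  match s with
  | none => (none, none)
  | some e => (some |p - e.1|, some e.2.2)

theorem pvAinner_eq (p : Int) : ∀ (abp : List ((Int × Int) × List Int)) (n : Int)
    (s : Option (Int × Int × ((Int × Int) × List Int))),
    abp.foldl (pvAStep p) (pvEmbed p s) = pvEmbed p ((pvCidx abp n).foldl (pvFstep p) s) := by
  intro abp
  induction abp with
  | nil => intro n s; rfl
  | cons it t ih =>
    intro n s
    match hit : it.2 with
    | [] =>
      have h1 : pvAStep p (pvEmbed p s) it = pvEmbed p s := by
        simp [pvAStep, hit]
      simp only [List.foldl_cons, pvCidx, hit, h1]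
      exact ih (n + 1) s
    | a :: rest =>
      have h1 : pvAStep p (pvEmbed p s) it = pvEmbed p (pvFstep p s (a, n, it)) := by
        cases s with
        | none => simp [pvAStep, hit, pvEmbed, pvFstep]
        | some e0 =>
          simp only [pvAStep, hit, pvEmbed, pvFstep]
          by_cases hlt : |p - a| < |p - e0.1| <;> simp [hlt]
      simp only [List.foldl_cons, pvCidx, hit, h1]
      exact ih (n + 1) (pvFstep p s (a, n, it))

theorem pvFM_from_some (p : Int) : ∀ (c : List (Int × Int × ((Int × Int) × List Int))) e,
    (∀ e' ∈ c, ¬ (|p - e'.1| < |p - e.1|)) → c.foldl (pvFstep p) (some e) = some e := by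
  intro c
  induction c with
  | nil => intro e _; rfl
  | cons x t ih =>
    intro e h
    have hx : ¬ (|p - x.1| < |p - e.1|) := h x (by simp)
    simp only [List.foldl_cons, pvFstep, if_neg hx]
    exact ih e (fun e' he' => h e' (by simp [he']))

theorem pvFM_mem (p : Int) : ∀ (c : List (Int × Int × ((Int × Int) × List Int))) s,
    c.foldl (pvFstep p) s = s ∨ ∃ e0 ∈ c, c.foldl (pvFstep p) s = some e0 := by
  intro c
  induction c with
  | nil => intro s; exact Or.inl rfl
  | cons x t ih =>
    intro s
    simp only [List.foldl_cons]
    have step : pvFstep p s x = s ∨ pvFstep p s x = some x := by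
      cases s with
      | none => exact Or.inr rfl
      | some e0 =>
        simp only [pvFstep]
        by_cases hlt : |p - x.1| < |p - e0.1| <;> simp [hlt]
    rcases ih (pvFstep p s x) with h | ⟨e0, he0, heq⟩
    · rcases step with h2 | h2
      · exact Or.inl (by rw [h, h2])
      · exact Or.inr ⟨x, by simp, by rw [h, h2]⟩
    · exact Or.inr ⟨e0, by simp [he0], heq⟩

theorem pvFM_unique (p : Int) (c1 c2 : List (Int × Int × ((Int × Int) × List Int))) (e) :
    (∀ e' ∈ c1, |p - e.1| < |p - e'.1|) → (∀ e' ∈ c2, |p - e.1| ≤ |p - e'.1|) →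
    pvFM p (c1 ++ e :: c2) = some e := by
  intro h1 h2
  unfold pvFM
  rw [List.foldl_append, List.foldl_cons]
  have hs1 : c1.foldl (pvFstep p) none = none ∨ ∃ e0 ∈ c1, c1.foldl (pvFstep p) none = some e0 :=
    pvFM_mem p c1 none
  have hstep : pvFstep p (c1.foldl (pvFstep p) none) e = some e := by
    rcases hs1 with h | ⟨e0, he0, heq⟩
    · rw [h]; rfl
    · rw [heq]; simp only [pvFstep]; rw [if_pos (h1 e0 he0)]
  rw [hstep]
  exact pvFM_from_some p c2 e (fun e' he' => not_lt.mpr (h2 e' he'))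

-- the dict built by B is exactly "first candidate with this key"
theorem pvBuildBest_get? (abp : List ((Int × Int) × List Int)) (k : Int) :
    (pvBuildBest abp).get? k = ((pvCidx abp 0).find? (fun e => e.1 == k)).map (fun e => e.2) := by
  have gen : ∀ (l : List ((Int × Int) × List Int)) (n : Int)
      (d : PySem.Dict Int (Int × ((Int × Int) × List Int))),
      ((PySem.List.enumerate l n).foldl pvBStep d).get? k
        = (d.get? k).or (((pvCidx l n).find? (fun e => e.1 == k)).map (fun e => e.2)) := by
    intro l
    induction l with
    | nil => intro n d; simp [PySem.List.enumerate, pvCidx]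
    | cons it t ih =>
      intro n d
      rw [PySem.List.enumerate_cons, List.foldl_cons]
      match hit : it.2 with
      | [] =>
        have hb : pvBStep d (n, it) = d := by simp [pvBStep, hit]
        rw [hb, ih]
        simp [pvCidx, hit]
      | a :: rest =>
        by_cases hc : d.contains a = true
        · have hb : pvBStep d (n, it) = d := by simp [pvBStep, hit, hc]
          rw [hb, ih]
          by_cases hk : a = k
          · subst hk
            have hs : (d.get? a).isSome := by
              rw [← PySem.Dict.contains_eq_isSome_get?]; exact hc
            rcases Option.isSome_iff_exists.mp hs with ⟨v, hv⟩
            simp [pvCidx, hit, hv, Option.or]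
          · have hbeq : (a == k) = false := by simpa using hk
            simp [pvCidx, hit, hbeq]
        · have hb : pvBStep d (n, it) = d.insert a (n, it) := by
            simp [pvBStep, hit, hc]
          rw [hb, ih]
          by_cases hk : a = k
          · subst hk
            have hn : d.get? a = none := by
              rw [Option.eq_none_iff_forall_ne_some]
              intro v hv
              rw [PySem.Dict.contains_eq_isSome_get?, hv] at hc
              exact hc rfl
            rw [PySem.Dict.get?_insert]
            simp [pvCidx, hit, hn]
          · have hbeq : (a == k) = false := by simpa using hk
            rw [PySem.Dict.get?_insert, if_neg (fun h => hk h.symm)]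
            simp [pvCidx, hit, hbeq]
  rw [pvBuildBest, gen]
  simp

theorem pvBuildBest_nodup (abp : List ((Int × Int) × List Int)) : (pvBuildBest abp).keys.Nodup := by
  have gen : ∀ (l : List (Int × ((Int × Int) × List Int)))
      (d : PySem.Dict Int (Int × ((Int × Int) × List Int))), d.keys.Nodup →
      (l.foldl pvBStep d).keys.Nodup := by
    intro l
    induction l with
    | nil => intro d hd; exact hd
    | cons pr t ih =>
      intro d hd
      rw [List.foldl_cons]
      refine ih _ ?_
      match hit : pr.2.2 with
      | [] => simpa [pvBStep, hit] using hd
      | a :: rest =>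
        by_cases hc : d.contains a = true
        · simpa [pvBStep, hit, hc] using hd
        · simp only [pvBStep, hit, hc, Bool.false_eq_true, if_false]
          exact PySem.Dict.nodup_keys_insert d a (pr.1, pr.2) hd
  exact gen _ _ PySem.Dict.nodup_keys_empty

-- candidate indices are strictly increasing
theorem pvCidx_idx_lt (abp : List ((Int × Int) × List Int)) (n : Int) :
    (pvCidx abp n).Pairwise (fun e e' => e.2.1 < e'.2.1) := by
  induction abp generalizing n with
  | nil => exact List.Pairwise.nil
  | cons it t ih =>
    have hge : ∀ m, ∀ e ∈ pvCidx t m, m ≤ e.2.1 := by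
      clear ih
      induction t with
      | nil => intro m e he; simp [pvCidx] at he
      | cons it2 t2 ih2 =>
        intro m e he
        match hit2 : it2.2 with
        | [] =>
          simp only [pvCidx, hit2] at he
          have := ih2 (m + 1) e he
          omega
        | a :: _ =>
          simp only [pvCidx, hit2, List.mem_cons] at he
          rcases he with rfl | he
          · simp
          · have := ih2 (m + 1) e he
            omega
    match hit : it.2 with
    | [] => simp only [pvCidx, hit]; exact ih (n + 1)
    | a :: _ =>
      simp only [pvCidx, hit]
      refine List.Pairwise.cons ?_ (ih (n + 1))
      intro e he
      have := hge (n + 1) e he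
      simp only
      omega

theorem pvKeys_mem (abp : List ((Int × Int) × List Int)) (k : Int) :
    k ∈ pvKeysOf abp ↔ ∃ e ∈ pvCidx abp 0, e.1 = k := by
  rw [pvKeysOf, PySem.List.mem_sorted, ← PySem.Dict.contains_iff_mem_keys,
    PySem.Dict.contains_eq_isSome_get?, pvBuildBest_get?]
  rw [Option.isSome_map]
  rw [List.find?_isSome]
  simp

theorem pvKeys_sorted (abp : List ((Int × Int) × List Int)) :
    (pvKeysOf abp).Pairwise (· < ·) := by
  have hle : (pvKeysOf abp).Pairwise (· ≤ ·) :=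
    PySem.List.sorted_pairwise (pvBuildBest abp).keys (fun x => x)
  have hnd : (pvKeysOf abp).Nodup :=
    ((PySem.List.sorted_perm (pvBuildBest abp).keys (fun x => x) false).nodup_iff).mpr
      (pvBuildBest_nodup abp)
  exact (hle.and hnd).imp (fun h => lt_of_le_of_ne h.1 h.2)

theorem pvKeys_nil_iff (abp : List ((Int × Int) × List Int)) :
    pvKeysOf abp = [] ↔ pvCidx abp 0 = [] := by
  constructor
  · intro h
    match hc : pvCidx abp 0 with
    | [] => rfl
    | e :: t =>
      exfalso
      have : e.1 ∈ pvKeysOf abp := (pvKeys_mem abp e.1).mpr ⟨e, by rw [hc]; simp, rfl⟩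
      rw [h] at this
      exact List.not_mem_nil this
  · intro h
    match hk : pvKeysOf abp with
    | [] => rfl
    | k :: t =>
      exfalso
      have : k ∈ pvKeysOf abp := by rw [hk]; simp
      rcases (pvKeys_mem abp k).mp this with ⟨e, he, _⟩
      rw [h] at he
      exact List.not_mem_nil he

-- abstract core of the chosen-key analysis, over any strictly sorted key list
theorem pvChoose_core (K : List Int) (best : PySem.Dict Int (Int × ((Int × Int) × List Int)))
    (p : Int) (hne : K ≠ []) (hsorted : K.Pairwise (· < ·)) :
    pvChooseKey K best p ∈ K ∧
    ∀ k' ∈ K,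
      |p - pvChooseKey K best p| ≤ |p - k'| ∧
      (k' ≠ pvChooseKey K best p →
        |p - pvChooseKey K best p| < |p - k'| ∨
        ((best.get? (pvChooseKey K best p)).map Prod.fst).getD 0 ≤
          ((best.get? k').map Prod.fst).getD 0) := by
  have hle : K.Pairwise (· ≤ ·) := hsorted.imp le_of_lt
  obtain ⟨hjle, hlt, hge⟩ := PySem.List.bisectLeft_spec K p hle
  have hlen : 0 < K.length := List.length_pos_iff.mpr hne
  have hmono : ∀ i1 i2 (h1 : i1 < K.length) (h2 : i2 < K.length), i1 < i2 → K[i1] < K[i2] :=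
    fun i1 i2 h1 h2 h => List.pairwise_iff_getElem.mp hsorted i1 i2 h1 h2 h
  have hinj : ∀ i1 i2 (h1 : i1 < K.length) (h2 : i2 < K.length), K[i1] = K[i2] → i1 = i2 := by
    intro i1 i2 h1 h2 heq
    by_contra hne2
    rcases Nat.lt_or_ge i1 i2 with h | h
    · have := hmono i1 i2 h1 h2 h; omega
    · have hlt2 : i2 < i1 := by omega
      have := hmono i2 i1 h2 h1 hlt2; omega
  rw [pvChooseKey]
  set j := PySem.List.bisectLeft K p with hj
  have dabs1 : ∀ idx (h : idx < K.length), idx < j → |p - K[idx]| = p - K[idx] :=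
    fun idx h hidx => abs_of_nonneg (by have := hlt idx h hidx; omega)
  have dabs2 : ∀ idx (h : idx < K.length), j ≤ idx → |p - K[idx]| = K[idx] - p := by
    intro idx h hidx
    rw [abs_sub_comm]
    exact abs_of_nonneg (by have := hge idx h hidx; omega)
  by_cases hj0 : j = 0
  · -- all keys ≥ p; the chosen key is keys[0]
    rw [if_pos hj0, List.getD_eq_getElem K 0 hlen]
    refine ⟨List.getElem_mem hlen, ?_⟩
    intro k' hk'
    obtain ⟨idx, hidx, rfl⟩ := List.mem_iff_getElem.mp hk'
    have e0 : |p - K[0]| = K[0] - p := dabs2 0 hlen (by omega)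
    have e1 : |p - K[idx]| = K[idx] - p := dabs2 idx hidx (by omega)
    have hle0 : K[0] ≤ K[idx] := by
      rcases Nat.eq_zero_or_pos idx with h | h
      · subst h; rfl
      · exact le_of_lt (hmono 0 idx hlen hidx h)
    refine ⟨by omega, ?_⟩
    intro hne2
    left
    have : idx ≠ 0 := fun h => hne2 (by subst h; rfl)
    have := hmono 0 idx hlen hidx (by omega)
    omega
  · rw [if_neg hj0]
    by_cases hjL : j = K.length
    · -- all keys < p; the chosen key is keys[-1]
      have hlast : K.length - 1 < K.length := by omega
      rw [if_pos hjL, List.getD_eq_getElem K 0 hlast]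
      refine ⟨List.getElem_mem hlast, ?_⟩
      intro k' hk'
      obtain ⟨idx, hidx, rfl⟩ := List.mem_iff_getElem.mp hk'
      have e0 : |p - K[K.length - 1]| = p - K[K.length - 1] := dabs1 _ hlast (by omega)
      have e1 : |p - K[idx]| = p - K[idx] := dabs1 idx hidx (by omega)
      have hle0 : K[idx] ≤ K[K.length - 1] := by
        rcases Nat.lt_or_ge idx (K.length - 1) with h | h
        · exact le_of_lt (hmono idx (K.length - 1) hidx hlast h)
        · have : idx = K.length - 1 := by omega
          subst this; rfl
      refine ⟨by omega, ?_⟩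
      intro hne2
      left
      have : idx ≠ K.length - 1 := fun h => hne2 (by subst h; rfl)
      have := hmono idx (K.length - 1) hidx hlast (by omega)
      omega
    · -- keys[j-1] < p ≤ keys[j]
      rw [if_neg hjL]
      have hjpos : 0 < j := by omega
      have hjlt : j < K.length := by omega
      have hj1 : j - 1 < K.length := by omega
      rw [List.getD_eq_getElem K 0 hj1, List.getD_eq_getElem K 0 hjlt]
      have hklp : K[j-1] < p := hlt (j-1) hj1 (by omega)
      have hprk : p ≤ K[j] := hge j hjlt (by omega)
      have ekl : |p - K[j-1]| = p - K[j-1] := dabs1 _ hj1 (by omega)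
      have ekr : |p - K[j]| = K[j] - p := dabs2 _ hjlt (by omega)
      -- distances of an arbitrary key
      have hgen : ∀ idx (hidx : idx < K.length),
          (idx < j → p - K[j-1] ≤ |p - K[idx]| ∧ (idx ≠ j - 1 → p - K[j-1] < |p - K[idx]|)) ∧
          (j ≤ idx → K[j] - p ≤ |p - K[idx]| ∧ (idx ≠ j → K[j] - p < |p - K[idx]|)) := by
        intro idx hidx
        constructor
        · intro hid
          rw [dabs1 idx hidx hid]
          have hle1 : K[idx] ≤ K[j-1] := by
            rcases Nat.lt_or_ge idx (j-1) with h | h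
            · exact le_of_lt (hmono idx (j-1) hidx hj1 h)
            · have : idx = j - 1 := by omega
              subst this; rfl
          refine ⟨by omega, ?_⟩
          intro hne2
          have := hmono idx (j-1) hidx hj1 (by omega)
          omega
        · intro hid
          rw [dabs2 idx hidx hid]
          have hle1 : K[j] ≤ K[idx] := by
            rcases Nat.lt_or_ge j idx with h | h
            · exact le_of_lt (hmono j idx hjlt hidx h)
            · have : idx = j := by omega
              subst this; rfl
          refine ⟨by omega, ?_⟩
          intro hne2
          have := hmono j idx hjlt hidx (by omega)
          omega
      by_cases hA : p - K[j-1] < K[j] - p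
      · rw [if_pos hA]
        refine ⟨List.getElem_mem hj1, ?_⟩
        intro k' hk'
        obtain ⟨idx, hidx, rfl⟩ := List.mem_iff_getElem.mp hk'
        rcases Nat.lt_or_ge idx j with hid | hid
        · obtain ⟨hle1, hstrict⟩ := (hgen idx hidx).1 hid
          refine ⟨by omega, fun hne2 => Or.inl ?_⟩
          have : idx ≠ j - 1 := fun h => hne2 (by subst h; rfl)
          have := hstrict this
          omega
        · obtain ⟨hle1, _⟩ := (hgen idx hidx).2 hid
          exact ⟨by omega, fun _ => Or.inl (by omega)⟩
      · rw [if_neg hA]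
        by_cases hB : K[j] - p < p - K[j-1]
        · rw [if_pos hB]
          refine ⟨List.getElem_mem hjlt, ?_⟩
          intro k' hk'
          obtain ⟨idx, hidx, rfl⟩ := List.mem_iff_getElem.mp hk'
          rcases Nat.lt_or_ge idx j with hid | hid
          · obtain ⟨hle1, _⟩ := (hgen idx hidx).1 hid
            exact ⟨by omega, fun _ => Or.inl (by omega)⟩
          · obtain ⟨hle1, hstrict⟩ := (hgen idx hidx).2 hid
            refine ⟨by omega, fun hne2 => Or.inl ?_⟩
            have : idx ≠ j := fun h => hne2 (by subst h; rfl)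
            have := hstrict this
            omega
        · -- tie: pick by stored original index
          rw [if_neg hB]
          have htie : p - K[j-1] = K[j] - p := by omega
          by_cases hC : ((best.get? K[j-1]).map Prod.fst).getD 0 < ((best.get? K[j]).map Prod.fst).getD 0
          · rw [if_pos hC]
            refine ⟨List.getElem_mem hj1, ?_⟩
            intro k' hk'
            obtain ⟨idx, hidx, rfl⟩ := List.mem_iff_getElem.mp hk'
            rcases Nat.lt_or_ge idx j with hid | hid
            · obtain ⟨hle1, hstrict⟩ := (hgen idx hidx).1 hid
              refine ⟨by omega, fun hne2 => Or.inl ?_⟩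
              have : idx ≠ j - 1 := fun h => hne2 (by subst h; rfl)
              have := hstrict this
              omega
            · obtain ⟨hle1, hstrict⟩ := (hgen idx hidx).2 hid
              refine ⟨by omega, fun hne2 => ?_⟩
              by_cases hidj : idx = j
              · subst hidj
                right
                omega
              · exact Or.inl (by have := hstrict hidj; omega)
          · rw [if_neg hC]
            refine ⟨List.getElem_mem hjlt, ?_⟩
            intro k' hk'
            obtain ⟨idx, hidx, rfl⟩ := List.mem_iff_getElem.mp hk'
            rcases Nat.lt_or_ge idx j with hid | hid
            · obtain ⟨hle1, hstrict⟩ := (hgen idx hidx).1 hid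
              refine ⟨by omega, fun hne2 => ?_⟩
              by_cases hidj : idx = j - 1
              · subst hidj
                right
                omega
              · exact Or.inl (by have := hstrict hidj; omega)
            · obtain ⟨hle1, hstrict⟩ := (hgen idx hidx).2 hid
              refine ⟨by omega, fun hne2 => Or.inl ?_⟩
              have : idx ≠ j := fun h => hne2 (by subst h; rfl)
              have := hstrict this
              omega

-- the chosen key minimises |p - ·| over keys, with index tie-break
theorem pvChoose_spec (abp : List ((Int × Int) × List Int)) (p : Int)
    (hne : pvKeysOf abp ≠ []) :
    pvChooseKey (pvKeysOf abp) (pvBuildBest abp) p ∈ pvKeysOf abp ∧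
    ∀ k' ∈ pvKeysOf abp,
      |p - pvChooseKey (pvKeysOf abp) (pvBuildBest abp) p| ≤ |p - k'| ∧
      (k' ≠ pvChooseKey (pvKeysOf abp) (pvBuildBest abp) p →
        |p - pvChooseKey (pvKeysOf abp) (pvBuildBest abp) p| < |p - k'| ∨
        (((pvBuildBest abp).get? (pvChooseKey (pvKeysOf abp) (pvBuildBest abp) p)).map Prod.fst).getD 0 ≤
          (((pvBuildBest abp).get? k').map Prod.fst).getD 0) := by
  exact pvChoose_core (pvKeysOf abp) (pvBuildBest abp) p hne (pvKeys_sorted abp)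

-- find? returns the first match: its stored index is minimal among matches
theorem pvFind_idx_le (q : (Int × Int × ((Int × Int) × List Int)) → Bool)
    (c : List (Int × Int × ((Int × Int) × List Int)))
    (hpw : c.Pairwise (fun e e' => e.2.1 < e'.2.1))
    (g : Int × Int × ((Int × Int) × List Int)) (hg : c.find? q = some g)
    (e' : Int × Int × ((Int × Int) × List Int)) (he' : e' ∈ c) (hq : q e' = true) :
    g.2.1 ≤ e'.2.1 := by
  obtain ⟨hqg, a1, a2, hsplit, hnot⟩ := List.find?_eq_some_iff_append.mp hg
  subst hsplit
  rcases List.mem_append.mp he' with h | h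
  · exact absurd hq (by simpa using hnot e' h)
  · rcases List.mem_cons.mp h with rfl | h
    · exact le_refl _
    · have hrest := (List.pairwise_append.mp hpw).2.1
      have := (List.pairwise_cons.mp hrest).1 e' h
      exact le_of_lt this

-- per-peak agreement: the reference selection equals B's dict lookup of the chosen key
theorem pvFM_eq_choice (abp : List ((Int × Int) × List Int)) (p : Int)
    (hne : pvKeysOf abp ≠ []) :
    ∃ i, pvFM p (pvCidx abp 0) =
      some (pvChooseKey (pvKeysOf abp) (pvBuildBest abp) p, i,
        (((pvBuildBest abp).get? (pvChooseKey (pvKeysOf abp) (pvBuildBest abp) p)).map Prod.snd).getD ((0,0),[])) := by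
  obtain ⟨hkmem, hmin⟩ := pvChoose_spec abp p hne
  set k := pvChooseKey (pvKeysOf abp) (pvBuildBest abp) p with hk
  set c := pvCidx abp 0 with hc
  -- k ∈ keys, so the candidate list has an entry with key k; find? returns the first one
  obtain ⟨e0, he0, he0k⟩ := (pvKeys_mem abp k).mp hkmem
  have hfind : ∃ f, c.find? (fun e => e.1 == k) = some f := by
    rw [← Option.isSome_iff_exists, List.find?_isSome]
    exact ⟨e0, he0, by simpa using he0k⟩
  obtain ⟨f, hf⟩ := hfind
  have hget : (pvBuildBest abp).get? k = some f.2 := by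
    rw [pvBuildBest_get?, ← hc, hf]; rfl
  have hfk : f.1 = k := by
    have := (List.find?_eq_some_iff_append.mp hf).1
    simpa using this
  obtain ⟨hqf, c1, c2, hsplit, hnot⟩ := List.find?_eq_some_iff_append.mp hf
  have hpw : c.Pairwise (fun e e' => e.2.1 < e'.2.1) := pvCidx_idx_lt abp 0
  -- membership of any candidate key in keys
  have hmemK : ∀ e' ∈ c, e'.1 ∈ pvKeysOf abp := fun e' he' =>
    (pvKeys_mem abp e'.1).mpr ⟨e', he', rfl⟩
  refine ⟨f.2.1, ?_⟩
  have hfm : pvFM p c = some f := by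
    rw [hsplit]
    apply pvFM_unique
    · -- every earlier candidate is strictly farther
      intro e' he1
      have he'c : e' ∈ c := by rw [hsplit]; simp [he1]
      have hne2 : e'.1 ≠ k := by
        have := hnot e' he1
        simpa using this
      obtain ⟨hle1, hstr⟩ := hmin e'.1 (hmemK e' he'c)
      rcases hstr hne2 with h | h
      · rw [hfk]; exact h
      · -- tie on distance: impossible, the earlier candidate's key was stored first
        exfalso
        -- the stored index of e'.1 is at most e'.2.1, which is smaller than f.2.1
        obtain ⟨g, hgfind⟩ : ∃ g, c.find? (fun e => e.1 == e'.1) = some g := by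
          rw [← Option.isSome_iff_exists, List.find?_isSome]
          exact ⟨e', he'c, by simp⟩
        have hgget : (pvBuildBest abp).get? e'.1 = some g.2 := by
          rw [pvBuildBest_get?, ← hc, hgfind]; rfl
        have hgle : g.2.1 ≤ e'.2.1 := pvFind_idx_le _ c hpw g hgfind e' he'c (by simp)
        have hlt2 : e'.2.1 < f.2.1 := by
          have hpw2 := hsplit ▸ hpw
          have := (List.pairwise_append.mp hpw2).2.2 e' he1 f (by simp)
          exact this
        rw [hget, hgget] at h
        simp at h
        omega
    · -- every later candidate is at least as far
      intro e' he2
      have he'c : e' ∈ c := by rw [hsplit]; simp [he2]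
      have := (hmin e'.1 (hmemK e' he'c)).1
      rw [hfk]
      exact this
  rw [hfm, hget]
  simp only [Option.map_some, Option.getD_some]
  rw [← hfk]

-- per-item agreement of the two loop bodies
theorem pvStep_eq (abp : List ((Int × Int) × List Int)) (item : (Int × Int) × List Int)
    (paired : List (((Int × Int) × List Int) × ((Int × Int) × List Int))) :
    (match item.2 with
      | [] => paired
      | _ :: _ =>
        match (abp.foldl (pvAStep (item.2.headD 0)) (none, none)).2 with
        | none => paired
        | some cp => paired ++ [(item, cp)])
    = (match item.2 with
      | [] => paired
      | _ :: _ =>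
        if (pvKeysOf abp).isEmpty then paired
        else
          paired ++ [(item, (((pvBuildBest abp).get? (pvChooseKey (pvKeysOf abp) (pvBuildBest abp) (item.2.headD 0))).map Prod.snd).getD ((0, 0), []))]) := by
  match hpk : item.2 with
  | [] => rfl
  | p :: rest =>
    simp only [List.headD_cons]
    have hst : abp.foldl (pvAStep p) (none, none) = pvEmbed p (pvFM p (pvCidx abp 0)) := by
      have h := pvAinner_eq p abp 0 none
      simpa [pvEmbed, pvFM] using h
    by_cases hkeys : pvKeysOf abp = []
    · have hc : pvCidx abp 0 = [] := (pvKeys_nil_iff abp).mp hkeys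
      rw [hst, hc]
      simp [pvFM, pvEmbed, hkeys]
    · obtain ⟨i, hfm⟩ := pvFM_eq_choice abp p hkeys
      rw [hst, hfm]
      have hne : (pvKeysOf abp).isEmpty = false := by
        simp [hkeys]
      simp only [pvEmbed, hne, Bool.false_eq_true, if_false]

-- ===== VERDICT (by name: the statement is the Claim_ definition above) =====
theorem pair_by_closest_peak_spec : Claim_equal_pair_by_closest_peak := by
  intro ppg abp _
  show pair_by_closest_peak ppg abp = pair_by_closest_peak_alt ppg abp
  have hf : (fun (paired : List (((Int × Int) × List Int) × ((Int × Int) × List Int)))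
      (item : (Int × Int) × List Int) =>
      (match item.2 with
        | [] => paired
        | _ :: _ =>
          match (abp.foldl (pvAStep (item.2.headD 0)) (none, none)).2 with
          | none => paired
          | some cp => paired ++ [(item, cp)]))
    = (fun paired item =>
      (match item.2 with
        | [] => paired
        | _ :: _ =>
          if (pvKeysOf abp).isEmpty then paired
          else
            paired ++ [(item, (((pvBuildBest abp).get? (pvChooseKey (pvKeysOf abp) (pvBuildBest abp) (item.2.headD 0))).map Prod.snd).getD ((0, 0), []))])) := by
    funext paired item
    exact pvStep_eq abp item paired
  show ppg.foldl _ [] = ppg.foldl _ []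
  rw [hf]
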